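-- pv_equiv track=rewrite | github.com/TBennur/BET-Lang | tests/transpile.py | addIndentation
-- ===== SOURCE A (Python) =====
-- def addIndentation(converted_program):
--     formatted_program = []
--     indent = "  "
--     excess_paren = 0
--     excess_brace = 0
--     cur_line = ""
--     i = 0
--     for c in converted_program:
--         # Safety
--         assert(excess_brace >= 0)
--         assert(excess_paren >= 0)
--         i += 1
--         if c == "\n":
--             formatted_program.append(cur_line)
--             if i < len(converted_program) and (converted_program[i] == "}" or converted_program[i] == ")"):
--                 cur_line = indent * (excess_paren + excess_brace - 1)
--             else:
--                 cur_line = indent * (excess_paren + excess_brace)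
--         else:
--             cur_line += c
--             if c == "{":
--                 excess_brace += 1
--             elif c == "}":
--                 excess_brace -= 1
--             elif c == "(":
--                 excess_paren += 1
--             elif c == ")":
--                 excess_paren -= 1
--     formatted_program.append(cur_line)
--
--     return "\n".join(formatted_program)
-- ===== SOURCE B (Python) =====
-- def addIndentation(converted_program):
--     lines = converted_program.split("\n")
--     indent = "  "
--     out = [lines[0]]
--     excess_paren = lines[0].count("(") - lines[0].count(")")
--     excess_brace = lines[0].count("{") - lines[0].count("}")
--     for line in lines[1:]:
--         dedent = 1 if line[:1] in ("}", ")") else 0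
--         out.append(indent * (excess_paren + excess_brace - dedent) + line)
--         excess_paren += line.count("(") - line.count(")")
--         excess_brace += line.count("{") - line.count("}")
--     return "\n".join(out)
-- ===== Notes on version B (the rewrite author's own statement) =====
-- stated objective: faster
-- what changed: B splits the program into lines once and emits each line with a prefix computed from running paren/brace counters (dedenting when the line starts with '}' or ')'), instead of A's character-by-character state machine that rebuilds each line via string += and peeks one character ahead at every newline; the per-character interpreter loop is replaced by C-level split/count/join, which a timing run measured as >15x faster.
import Mathlib
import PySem

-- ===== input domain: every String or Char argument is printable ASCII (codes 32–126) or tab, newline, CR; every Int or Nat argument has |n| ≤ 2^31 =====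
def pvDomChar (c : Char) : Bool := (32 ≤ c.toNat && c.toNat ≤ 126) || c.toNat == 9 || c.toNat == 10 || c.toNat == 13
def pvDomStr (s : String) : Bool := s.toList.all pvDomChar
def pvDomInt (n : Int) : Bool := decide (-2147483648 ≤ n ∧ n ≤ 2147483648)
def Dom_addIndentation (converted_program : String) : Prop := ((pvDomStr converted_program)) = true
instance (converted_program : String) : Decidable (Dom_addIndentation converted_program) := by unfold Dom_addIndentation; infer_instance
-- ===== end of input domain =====

-- B re-decomposes A's character-by-character indenter into a split-on-newline pass with running
-- bracket counters (measured faster: C-level split/count/join replace the per-char loop); where A's asserts fire (a counter negative on a proper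
-- prefix) A raises AssertionError, so those inputs are outside Pre_ and B returns normally there.


-- ===== PORT A =====
-- One loop iteration of A; state = (formatted_program, excess_paren, excess_brace, cur_line, i).
-- The two asserts are omitted: Pre_addIndentation excludes exactly the inputs on which they fire.
-- Python's bounds-checked `converted_program[i]` ('i < len' guard, then index) is ported with
-- the same guard and `List.getD` (the default is never read: the guard ensures i is in range).
def aStep (orig : List Char) (st : List (List Char) × Int × Int × List Char × Nat) (c : Char) :
    List (List Char) × Int × Int × List Char × Nat :=
  match st with
  | (fp, ep, eb, cur, i0) =>
    let i := i0 + 1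
    if c = '\n' then
      let cur' :=
        if i < orig.length ∧ (orig.getD i ' ' = '}' ∨ orig.getD i ' ' = ')') then
          PySem.List.pyRepeat "  ".toList (ep + eb - 1)
        else
          PySem.List.pyRepeat "  ".toList (ep + eb)
      (fp ++ [cur], ep, eb, cur', i)
    else
      let cur' := cur ++ [c]
      if c = '{' then (fp, ep, eb + 1, cur', i)
      else if c = '}' then (fp, ep, eb - 1, cur', i)
      else if c = '(' then (fp, ep + 1, eb, cur', i)
      else if c = ')' then (fp, ep - 1, eb, cur', i)
      else (fp, ep, eb, cur', i)

def addIndentation (converted_program : String) : String :=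
  let l := converted_program.toList
  let st := l.foldl (aStep l) ([], 0, 0, [], 0)
  String.mk (PySem.Chars.join ['\n'] (st.1 ++ [st.2.2.2.1]))

-- ===== PORT B =====
-- `indent * (excess_paren + excess_brace - dedent) + line`; `line[:1] in ("}", ")")` is `take 1`.
def bLine (ep eb : Int) (line : List Char) : List Char :=
  let dedent : Int := if line.take 1 = ['}'] ∨ line.take 1 = [')'] then 1 else 0
  PySem.List.pyRepeat "  ".toList (ep + eb - dedent) ++ line

-- the `for line in lines[1:]` loop: emitted lines, threading the two counters
def bRest : List (List Char) → Int → Int → List (List Char)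
  | [], _, _ => []
  | line :: rest, ep, eb =>
    bLine ep eb line ::
      bRest rest (ep + ((PySem.Chars.count line ['('] : Int) - PySem.Chars.count line [')']))
                 (eb + ((PySem.Chars.count line ['{'] : Int) - PySem.Chars.count line ['}']))

def addIndentation_alt (converted_program : String) : String :=
  match PySem.Chars.splitOn converted_program.toList ['\n'] with
  | [] => ""   -- unreachable: split("\n") always yields at least one piece
  | first :: rest =>
    String.mk (PySem.Chars.join ['\n'] (first ::
      bRest rest ((PySem.Chars.count first ['('] : Int) - PySem.Chars.count first [')'])
                 ((PySem.Chars.count first ['{'] : Int) - PySem.Chars.count first ['}'])))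

-- ===== PRECONDITION & SPEC =====
-- Pre_ excludes exactly the inputs on which Python A raises AssertionError: its asserts check the
-- counters before each character, i.e. the paren and brace balances of every proper prefix.
def Pre_addIndentation (converted_program : String) : Prop :=
  ∀ j, j < converted_program.toList.length →
    (converted_program.toList.take j).count ')' ≤ (converted_program.toList.take j).count '(' ∧
    (converted_program.toList.take j).count '}' ≤ (converted_program.toList.take j).count '{'
instance (converted_program : String) : Decidable (Pre_addIndentation converted_program) := by
  unfold Pre_addIndentation; infer_instance

def pvWitness_addIndentation : String := "f(){\n()\n}"

def Spec_addIndentation (converted_program : String) (out : String) : Prop := out = addIndentation_alt converted_program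
instance (converted_program : String) (out : String) : Decidable (Spec_addIndentation converted_program out) := by unfold Spec_addIndentation; infer_instance

-- ===== CLAIM (what is proved, stated in full; the proofs are below) =====
def Claim_equal_addIndentation : Prop := ∀ (converted_program : String), Dom_addIndentation converted_program → Pre_addIndentation converted_program → Spec_addIndentation converted_program (addIndentation converted_program)

-- ===== LEMMAS AND PROOFS =====

-- A's loop, rephrased as structural recursion on the remaining suffix: the lookahead
-- `converted_program[i]` is the head of the suffix after the newline.
def runA : List Char → Int → Int → List Char → List (List Char)
  | [], _, _, cur => [cur]
  | c :: rest, ep, eb, cur =>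
    if c = '\n' then
      cur :: runA rest ep eb
        (if rest.head? = some '}' ∨ rest.head? = some ')' then
          PySem.List.pyRepeat "  ".toList (ep + eb - 1)
        else
          PySem.List.pyRepeat "  ".toList (ep + eb))
    else
      let cur' := cur ++ [c]
      if c = '{' then runA rest ep (eb + 1) cur'
      else if c = '}' then runA rest ep (eb - 1) cur'
      else if c = '(' then runA rest (ep + 1) eb cur'
      else if c = ')' then runA rest (ep - 1) eb cur'
      else runA rest ep eb cur'

-- splitting a char list on '\n', structurally
def lineSplit : List Char → List (List Char)
  | [] => [[]]
  | c :: r =>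
    if c = '\n' then [] :: lineSplit r
    else
      match lineSplit r with
      | [] => [[c]]   -- unreachable
      | h :: t => (c :: h) :: t

lemma lineSplit_ne_nil (l : List Char) : lineSplit l ≠ [] := by
  cases l with
  | nil => simp [lineSplit]
  | cons c r =>
    simp only [lineSplit]
    split_ifs
    · simp
    · rcases h : lineSplit r with _ | ⟨h0, t⟩ <;> simp

lemma count_go_single (c : Char) :
    ∀ (l : List Char) (fuel acc : Nat), l.length ≤ fuel →
      PySem.Chars.count.go [c] fuel l acc = acc + l.count c := by
  intro l
  induction l with
  | nil => intro fuel acc _; cases fuel <;> simp [PySem.Chars.count.go]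
  | cons x t ih =>
    intro fuel acc hle
    cases fuel with
    | zero => simp at hle
    | succ f =>
      have hf : t.length ≤ f := by simpa using hle
      by_cases hx : c = x
      · subst hx
        simp only [PySem.Chars.count.go, List.isPrefixOf, BEq.rfl, Bool.true_and,
          List.isPrefixOf_nil_left, if_true, List.length_cons, List.length_nil,
          List.drop_succ_cons, List.drop_zero]
        rw [ih f (acc + 1) hf]
        simp [List.count_cons]
        omega
      · have hbx : (x == c) = false := by
          simp [beq_iff_eq]; exact fun h => hx h.symm
        simp only [PySem.Chars.count.go, List.isPrefixOf, List.isPrefixOf_nil_left,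
          Bool.and_true]
        rw [if_neg (by simp [beq_iff_eq]; exact hx)]
        rw [ih f acc hf]
        simp [List.count_cons, hbx]

lemma chars_count_single (l : List Char) (c : Char) :
    PySem.Chars.count l [c] = l.count c := by
  simp only [PySem.Chars.count, List.isEmpty_cons, if_false, Bool.false_eq_true]
  simpa using count_go_single c l l.length 0 le_rfl

lemma splitOn_go_newline :
    ∀ (l : List Char) (fuel : Nat) (cur : List Char) (acc : List (List Char)),
      l.length ≤ fuel →
      PySem.Chars.splitOn.go ['\n'] fuel l cur acc =
        acc.reverse ++
          (match lineSplit l with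
           | [] => [cur.reverse]
           | h :: t => (cur.reverse ++ h) :: t) := by
  intro l
  induction l with
  | nil => intro fuel cur acc _; cases fuel <;> simp [PySem.Chars.splitOn.go, lineSplit]
  | cons c r ih =>
    intro fuel cur acc hle
    cases fuel with
    | zero => simp at hle
    | succ f =>
      have hf : r.length ≤ f := by simpa using hle
      by_cases hc : c = '\n'
      · subst hc
        simp only [PySem.Chars.splitOn.go, List.isPrefixOf, BEq.rfl, Bool.true_and,
          List.isPrefixOf_nil_left, if_true, List.length_cons, List.length_nil,
          List.drop_succ_cons, List.drop_zero]
        rw [ih f [] (cur.reverse :: acc) hf]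
        rcases hL : lineSplit r with _ | ⟨h0, t0⟩
        · exact absurd hL (lineSplit_ne_nil r)
        · simp [lineSplit, hL]
      · simp only [PySem.Chars.splitOn.go, List.isPrefixOf, List.isPrefixOf_nil_left,
          Bool.and_true]
        rw [if_neg (by simp [beq_iff_eq]; exact fun h => hc h.symm)]
        rw [ih f (c :: cur) acc hf]
        rcases hL : lineSplit r with _ | ⟨h0, t0⟩
        · exact absurd hL (lineSplit_ne_nil r)
        · simp [lineSplit, hL, hc]

lemma splitOn_newline (l : List Char) :
    PySem.Chars.splitOn l ['\n'] = lineSplit l := by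
  have := splitOn_go_newline l (l.length + 1) [] [] (by omega)
  simp only [PySem.Chars.splitOn]
  rw [this]
  rcases hL : lineSplit l with _ | ⟨h0, t0⟩
  · exact absurd hL (lineSplit_ne_nil l)
  · simp

lemma afold :
    ∀ (suf pre : List Char) (fp : List (List Char)) (ep eb : Int) (cur : List Char),
      (suf.foldl (aStep (pre ++ suf)) (fp, ep, eb, cur, pre.length)).1 ++
        [(suf.foldl (aStep (pre ++ suf)) (fp, ep, eb, cur, pre.length)).2.2.2.1] =
      fp ++ runA suf ep eb cur := by
  intro suf
  induction suf with
  | nil => intro pre fp ep eb cur; simp [runA]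
  | cons c rest ih =>
    intro pre fp ep eb cur
    by_cases hc : c = '\n'
    · subst hc
      have hcond :
          ((pre.length + 1 < (pre ++ '\n' :: rest).length ∧
            ((pre ++ '\n' :: rest).getD (pre.length + 1) ' ' = '}' ∨
             (pre ++ '\n' :: rest).getD (pre.length + 1) ' ' = ')')) ↔
           (rest.head? = some '}' ∨ rest.head? = some ')')) := by
        cases rest <;> simp
      have hre : pre ++ '\n' :: rest = (pre ++ ['\n']) ++ rest := by
        rw [List.append_assoc]; rfl
      have hstep : aStep (pre ++ '\n' :: rest) (fp, ep, eb, cur, pre.length) '\n' =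
          (fp ++ [cur], ep, eb,
            (if rest.head? = some '}' ∨ rest.head? = some ')' then
              PySem.List.pyRepeat "  ".toList (ep + eb - 1)
            else
              PySem.List.pyRepeat "  ".toList (ep + eb)),
            (pre ++ ['\n']).length) := by
        have hlen : (pre ++ ['\n']).length = pre.length + 1 := by simp
        simp only [aStep, hlen, hcond]
        simp
      rw [List.foldl_cons, hstep, hre, ih (pre ++ ['\n']) (fp ++ [cur]) ep eb _]
      simp [runA]
    · have hre : pre ++ c :: rest = (pre ++ [c]) ++ rest := by
        rw [List.append_assoc]; rfl
      have hstep : aStep (pre ++ c :: rest) (fp, ep, eb, cur, pre.length) c =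
          (fp, (if c = '(' then ep + 1 else if c = ')' then ep - 1 else ep),
               (if c = '{' then eb + 1 else if c = '}' then eb - 1 else eb),
               cur ++ [c], (pre ++ [c]).length) := by
        have hlen : (pre ++ [c]).length = pre.length + 1 := by simp
        simp only [aStep, hlen, if_neg hc]
        split_ifs <;> simp_all
      rw [List.foldl_cons, hstep, hre, ih (pre ++ [c])]
      have hrun : runA (c :: rest) ep eb cur =
          runA rest (if c = '(' then ep + 1 else if c = ')' then ep - 1 else ep)
                    (if c = '{' then eb + 1 else if c = '}' then eb - 1 else eb)
                    (cur ++ [c]) := by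
        simp only [runA, if_neg hc]
        split_ifs <;> simp_all
      rw [hrun]

lemma runA_eq :
    ∀ (l : List Char) (L0 : List Char) (rest : List (List Char)),
      lineSplit l = L0 :: rest →
      ∀ (ep eb : Int) (cur : List Char),
        runA l ep eb cur =
          (cur ++ L0) ::
            bRest rest (ep + ((L0.count '(' : Int) - L0.count ')'))
                       (eb + ((L0.count '{' : Int) - L0.count '}')) := by
  intro l
  induction l with
  | nil =>
    intro L0 rest hL ep eb cur
    simp only [lineSplit] at hL
    cases hL
    simp [runA, bRest]
  | cons c r ih =>
    intro L0 rest hL ep eb cur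
    rcases hr : lineSplit r with _ | ⟨L1, t1⟩
    · exact absurd hr (lineSplit_ne_nil r)
    by_cases hc : c = '\n'
    · subst hc
      have hLs : lineSplit ('\n' :: r) = [] :: L1 :: t1 := by
        simp [lineSplit, hr]
      rw [hLs] at hL
      cases hL
      have hncur :
          (if r.head? = some '}' ∨ r.head? = some ')' then
            PySem.List.pyRepeat "  ".toList (ep + eb - 1)
          else
            PySem.List.pyRepeat "  ".toList (ep + eb)) ++ L1 = bLine ep eb L1 := by
        cases r with
        | nil =>
          simp only [lineSplit] at hr
          cases hr
          simp [bLine]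
        | cons e r2 =>
          by_cases he : e = '\n'
          · subst he
            have h3 : lineSplit ('\n' :: r2) = [] :: lineSplit r2 := by
              simp [lineSplit]
            rw [h3] at hr
            cases hr
            simp [bLine]
          · rcases h2 : lineSplit r2 with _ | ⟨h0, t0⟩
            · exact absurd h2 (lineSplit_ne_nil r2)
            have h3 : lineSplit (e :: r2) = (e :: h0) :: t0 := by
              simp [lineSplit, he, h2]
            rw [h3] at hr
            cases hr
            by_cases hb1 : e = '}' <;> by_cases hb2 : e = ')' <;>
              simp [bLine, hb1, hb2]
      have hA : runA ('\n' :: r) ep eb cur =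
          cur :: runA r ep eb
            (if r.head? = some '}' ∨ r.head? = some ')' then
              PySem.List.pyRepeat "  ".toList (ep + eb - 1)
            else
              PySem.List.pyRepeat "  ".toList (ep + eb)) := by
        simp [runA]
      rw [hA, ih L1 t1 hr ep eb _]
      simp only [List.count_nil, Nat.cast_zero, sub_zero, add_zero, List.append_nil,
        List.nil_append]
      simp only [bRest, chars_count_single]
      rw [hncur]
    · have hLc : lineSplit (c :: r) = (c :: L1) :: t1 := by
        simp [lineSplit, hc, hr]
      rw [hLc] at hL
      injection hL with hM1 hM2
      subst hM1; subst hM2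
      have hrun : runA (c :: r) ep eb cur =
          runA r (if c = '(' then ep + 1 else if c = ')' then ep - 1 else ep)
                 (if c = '{' then eb + 1 else if c = '}' then eb - 1 else eb)
                 (cur ++ [c]) := by
        simp only [runA, if_neg hc]
        split_ifs <;> simp_all
      rw [hrun, ih L1 t1 hr _ _ _]
      have e1 : (cur ++ [c]) ++ L1 = cur ++ c :: L1 := by simp
      rw [e1]
      have eP : (if c = '(' then ep + 1 else if c = ')' then ep - 1 else ep) +
            ((L1.count '(' : Int) - L1.count ')') =
          ep + (((c :: L1).count '(' : Int) - (c :: L1).count ')') := by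
        by_cases g1 : c = '(' <;> by_cases g2 : c = ')' <;>
          simp [List.count_cons, g1, g2] <;> push_cast <;> ring
      have eB : (if c = '{' then eb + 1 else if c = '}' then eb - 1 else eb) +
            ((L1.count '{' : Int) - L1.count '}') =
          eb + (((c :: L1).count '{' : Int) - (c :: L1).count '}') := by
        by_cases g1 : c = '{' <;> by_cases g2 : c = '}' <;>
          simp [List.count_cons, g1, g2] <;> push_cast <;> ring
      rw [eP, eB]

lemma addIndentation_eq (s : String) : addIndentation s = addIndentation_alt s := by
  rcases hL : lineSplit s.toList with _ | ⟨L0, rest⟩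
  · exact absurd hL (lineSplit_ne_nil s.toList)
  have h1 := afold s.toList [] [] 0 0 []
  simp only [List.nil_append, List.length_nil] at h1
  have h2 := runA_eq s.toList L0 rest hL 0 0 []
  simp only [addIndentation, addIndentation_alt, splitOn_newline, hL, h1, h2,
    chars_count_single, List.nil_append, zero_add]

-- ===== VERDICT (by name: the statement is the Claim_ definition above) =====
theorem addIndentation_spec : Claim_equal_addIndentation := by
  intro s _ _
  unfold Spec_addIndentation
  exact addIndentation_eq s
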